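-- pv_equiv track=rewrite | github.com/leonow32/micropython | utils/base16.py | bytes_to_base16
-- ===== SOURCE A (Python) =====
-- lookup = '0123456789ABCDEF'
--
-- def bytes_to_base16(data, separator=" "):
--     if isinstance(data, str):
--         data = data.encode()
--
--     result = ""
--
--     for byte in data:
--         result += lookup[byte >> 4]
--         result += lookup[byte & 0x0F]
--         result += separator
--
--     return result.rstrip(separator)
-- ===== SOURCE B (Python) =====
-- def bytes_to_base16(data, separator=" "):
--     if isinstance(data, str):
--         data = data.encode()
--     hexstr = data.hex().upper()
--     return separator.join(hexstr[i:i+2] for i in range(0, len(hexstr), 2))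
-- ===== Notes on version B (the rewrite author's own statement) =====
-- stated objective: idiomatic
-- what changed: B computes the whole hex string once with data.hex().upper() and joins its 2-char windows with separator.join, instead of A's per-byte nibble table lookups accumulated into a growing string followed by rstrip.
-- intended difference: When data is non-empty and the separator contains the low-nibble hex digit of data's last byte, A's rstrip(separator) also strips trailing hex digits of the encoding itself, returning a truncated string, while B returns the full separator-joined hex encoding, which is the intended value since the rstrip was only meant to drop the trailing separator. — e.g. on bytes_to_base16("A", "1"): A returns "4", B returns "41"
import Mathlib
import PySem

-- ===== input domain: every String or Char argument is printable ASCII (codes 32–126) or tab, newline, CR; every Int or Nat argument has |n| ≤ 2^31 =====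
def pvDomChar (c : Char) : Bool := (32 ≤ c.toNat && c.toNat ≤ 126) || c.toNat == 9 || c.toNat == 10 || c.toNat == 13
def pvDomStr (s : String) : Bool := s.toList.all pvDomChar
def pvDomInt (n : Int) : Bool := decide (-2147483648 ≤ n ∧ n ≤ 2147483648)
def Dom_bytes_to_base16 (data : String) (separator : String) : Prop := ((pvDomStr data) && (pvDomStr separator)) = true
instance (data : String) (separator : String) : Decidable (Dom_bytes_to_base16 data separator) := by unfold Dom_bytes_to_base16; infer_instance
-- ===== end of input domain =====

-- B computes the hex string once and joins its 2-char windows with the separator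
-- (idiomatic); A's rstrip(separator) instead of a plain join also eats trailing hex
-- digits of the data when the separator contains them — B differs there (see D_).

-- ===== PORT A =====
-- lookup = '0123456789ABCDEF'
def pvLookup : List Char := ['0','1','2','3','4','5','6','7','8','9','A','B','C','D','E','F']

-- hand port of str.rstrip(chars): drop trailing characters belonging to the set `chars`
-- (exact, including chars = "", which strips nothing)
def pvRstrip (s chars : List Char) : List Char :=
  (s.reverse.dropWhile chars.contains).reverse

def bytes_to_base16 (data : String) (separator : String) : String :=
  -- data.encode(): on the ASCII domain each char is one byte, its code point
  let bytes := data.toList.map (fun c => c.toNat)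
  -- lookup[byte >> 4] / lookup[byte & 0x0F]: both indices are < 16, so the
  -- getD default is unreachable (no IndexError in Python either)
  let result := bytes.foldl
    (fun r b => ((r ++ [pvLookup.getD (b >>> 4) '0']) ++ [pvLookup.getD (b &&& 15) '0']) ++ separator.toList) []
  String.ofList (pvRstrip result separator.toList)

-- ===== PORT B =====
-- one byte of data.hex().upper(): two uppercase hex digits
def pvHexPair (b : Nat) : List Char := [pvLookup.getD (b >>> 4) '0', pvLookup.getD (b &&& 15) '0']

def bytes_to_base16_alt (data : String) (separator : String) : String :=
  -- hexstr = data.encode().hex().upper()  (library call, ported as the corresponding map)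
  let hexstr := (data.toList.map (fun c => c.toNat)).flatMap pvHexPair
  -- separator.join(hexstr[i:i+2] for i in range(0, len(hexstr), 2))
  let parts := (PySem.List.pyRange 0 (hexstr.length : Int) 2).map
    (fun i => PySem.List.slice hexstr (some i) (some (i + 2)))
  String.ofList (PySem.Chars.join separator.toList parts)

-- ===== PRECONDITION & SPEC =====
-- When data is non-empty and separator contains the low-nibble hex digit of the last
-- byte, A's rstrip(separator) also strips trailing hex digits of the encoding itself,
-- returning a truncated string, while B returns the full separator-joined hex
-- encoding — the intended value: the rstrip was only meant to drop the trailing separator.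
def D_bytes_to_base16 (data : String) (separator : String) : Prop :=
  data.toList ≠ [] ∧
    separator.toList.contains (pvLookup.getD ((data.toList.getLast!).toNat &&& 15) '0') = true
instance (data : String) (separator : String) : Decidable (D_bytes_to_base16 data separator) := by
  unfold D_bytes_to_base16; infer_instance

def Spec_bytes_to_base16 (data : String) (separator : String) (out : String) : Prop :=
  ¬ D_bytes_to_base16 data separator → out = bytes_to_base16_alt data separator
instance (data : String) (separator : String) (out : String) : Decidable (Spec_bytes_to_base16 data separator out) := by unfold Spec_bytes_to_base16; infer_instance

def pvDiffWitness_bytes_to_base16 : String × String := ("A", "1")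
def pvDiffWitnessOut_bytes_to_base16 : String × String := ("4", "41")

-- ===== CLAIM (what is proved, stated in full; the proofs are below) =====
def Claim_unchanged_bytes_to_base16 : Prop := ∀ (data : String) (separator : String), Dom_bytes_to_base16 data separator → Spec_bytes_to_base16 data separator (bytes_to_base16 data separator)
def Claim_changed_bytes_to_base16 : Prop := Dom_bytes_to_base16 (pvDiffWitness_bytes_to_base16.1) (pvDiffWitness_bytes_to_base16.2) ∧ D_bytes_to_base16 (pvDiffWitness_bytes_to_base16.1) (pvDiffWitness_bytes_to_base16.2) ∧ bytes_to_base16 (pvDiffWitness_bytes_to_base16.1) (pvDiffWitness_bytes_to_base16.2) = pvDiffWitnessOut_bytes_to_base16.1 ∧ bytes_to_base16_alt (pvDiffWitness_bytes_to_base16.1) (pvDiffWitness_bytes_to_base16.2) = pvDiffWitnessOut_bytes_to_base16.2 ∧ pvDiffWitnessOut_bytes_to_base16.1 ≠ pvDiffWitnessOut_bytes_to_base16.2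
def Claim_exact_bytes_to_base16 : Prop := ∀ (data : String) (separator : String), Dom_bytes_to_base16 data separator → D_bytes_to_base16 data separator → bytes_to_base16 data separator ≠ bytes_to_base16_alt data separator

-- ===== LEMMAS AND PROOFS =====

-- A's accumulation loop flattens the per-byte blocks
theorem pv_foldl_hex (bs : List Nat) (sep acc : List Char) :
    bs.foldl (fun r b => ((r ++ [pvLookup.getD (b >>> 4) '0']) ++ [pvLookup.getD (b &&& 15) '0']) ++ sep) acc
      = acc ++ (bs.map (fun b => pvHexPair b ++ sep)).flatten := by
  induction bs generalizing acc with
  | nil => simp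
  | cons b bs ih => rw [List.foldl_cons, ih]; simp [pvHexPair]

theorem pv_hexPair_len (b : Nat) : (pvHexPair b).length = 2 := by simp [pvHexPair]

-- chunking the flattening of 2-char blocks into 2-char windows recovers the blocks
theorem pv_chunk_range (ps : List (List Char)) (h : ∀ p ∈ ps, p.length = 2) :
    (List.range ps.length).map (fun k => (ps.flatten.drop (2 * k)).take 2) = ps := by
  induction ps with
  | nil => simp
  | cons p rest ih =>
    have hp : p.length = 2 := h p (by simp)
    have hrest : ∀ q ∈ rest, q.length = 2 := fun q hq => h q (by simp [hq])
    rw [List.length_cons, List.range_succ_eq_map]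
    simp only [List.map_cons, List.map_map]
    refine List.cons_eq_cons.mpr ⟨?_, ?_⟩
    · have hfl : (p :: rest).flatten = p ++ rest.flatten := by simp
      rw [Nat.mul_zero, List.drop_zero, hfl, List.take_append_of_le_length (Nat.le_of_eq hp.symm),
        List.take_of_length_le (Nat.le_of_eq hp)]
    · have : ∀ k, ((p :: rest).flatten.drop (2 * (k + 1))).take 2
          = (rest.flatten.drop (2 * k)).take 2 := by
        intro k
        have hfl : (p :: rest).flatten = p ++ rest.flatten := by simp
        rw [hfl, show 2 * (k + 1) = p.length + 2 * k by omega, List.drop_append,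
          List.drop_of_length_le (by omega), List.nil_append]
        simp
      calc (List.range rest.length).map ((fun k => ((p :: rest).flatten.drop (2 * k)).take 2) ∘ (fun i => i + 1))
          = (List.range rest.length).map (fun k => (rest.flatten.drop (2 * k)).take 2) := by
            apply List.map_congr_left; intro k _; exact this k
        _ = rest := ih hrest

theorem pv_len_flatten (ps : List (List Char)) (h : ∀ p ∈ ps, p.length = 2) :
    ps.flatten.length = 2 * ps.length := by
  induction ps with
  | nil => simp
  | cons p rest ih =>
    have hp := h p (by simp)
    have := ih (fun q hq => h q (by simp [hq]))
    simp only [List.flatten_cons, List.length_append, List.length_cons, hp, this]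
    omega

-- B's chunk list equals the block list
theorem pv_parts_eq (bs : List Nat) (hexstr : List Char)
    (hh : hexstr = bs.flatMap pvHexPair) :
    (PySem.List.pyRange 0 (hexstr.length : Int) 2).map
        (fun i => PySem.List.slice hexstr (some i) (some (i + 2)))
      = bs.map pvHexPair := by
  have hlen : hexstr.length = 2 * bs.length := by
    rw [hh, List.flatMap_def]
    have h2 := pv_len_flatten (bs.map pvHexPair)
      (by intro p hp; simp at hp; obtain ⟨b, _, rfl⟩ := hp; exact pv_hexPair_len b)
    simpa using h2
  rw [PySem.List.pyRange_of_pos 0 (hexstr.length : Int) (by norm_num)]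
  have hcount : (if (0:Int) < (hexstr.length : Int) then (((hexstr.length : Int) - 0 + 2 - 1) / 2).toNat else 0) = bs.length := by
    rw [hlen]
    split_ifs with hpos
    · push_cast; omega
    · push_cast at hpos; omega
  rw [hcount, List.map_map]
  have hstep : ∀ k : Nat,
      PySem.List.slice hexstr (some ((0:Int) + 2 * (k:Int))) (some ((0:Int) + 2 * (k:Int) + 2))
        = (hexstr.drop (2 * k)).take 2 := by
    intro k
    have h1 : ((0:Int) + 2 * (k:Int)) = ((2 * k : Nat) : Int) := by push_cast; ring
    have h2 : ((0:Int) + 2 * (k:Int) + 2) = ((2 * k : Nat) : Int) + ((2 : Nat) : Int) := by push_cast; ring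
    rw [h2, h1, PySem.List.slice_natCast_add]
  simp only [Function.comp_def]
  rw [List.map_congr_left (fun k _ => hstep k)]
  have := pv_chunk_range (bs.map pvHexPair)
    (by intro p hp; simp at hp; obtain ⟨b, _, rfl⟩ := hp; exact pv_hexPair_len b)
  rw [hh, List.flatMap_def]
  simpa using this

-- join over qs ++ [p] equals flatten of (block ++ sep) over qs, then p
theorem pv_join_concat (sep p : List Char) (qs : List (List Char)) :
    PySem.Chars.join sep (qs ++ [p])
      = (qs.map (fun q => q ++ sep)).flatten ++ p := by
  induction qs with
  | nil => simp [PySem.Chars.join_singleton]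
  | cons q qs ih =>
    cases qs with
    | nil => simp [PySem.Chars.join_cons_cons, PySem.Chars.join_singleton]
    | cons r rs =>
      simp only [List.cons_append]
      rw [PySem.Chars.join_cons_cons sep q r (rs ++ [p]), ← List.cons_append, ih]
      simp [List.append_assoc]

-- dropWhile skips a prefix all of whose elements satisfy the predicate
theorem pv_dropWhile_all {α : Type} (p : α → Bool) (a b : List α)
    (h : ∀ x ∈ a, p x = true) : (a ++ b).dropWhile p = b.dropWhile p := by
  induction a with
  | nil => rfl
  | cons x a ih =>
    rw [List.cons_append, List.dropWhile_cons_of_pos (h x (by simp))]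
    exact ih (fun y hy => h y (by simp [hy]))

-- rstrip over flatten (block ++ sep) with last low digit not in sep = join
theorem pv_rstrip_flatten (sep : List Char) (bs : List Nat) (hne : bs ≠ [])
    (hlast : sep.contains (pvLookup.getD (bs.getLast hne &&& 15) '0') = false) :
    pvRstrip ((bs.map (fun b => pvHexPair b ++ sep)).flatten) sep
      = PySem.Chars.join sep (bs.map pvHexPair) := by
  obtain ⟨qs, b, rfl⟩ := bs.eq_nil_or_concat.resolve_left hne
  simp only [List.concat_eq_append] at hlast ⊢
  rw [List.getLast_concat] at hlast
  have hmap : (qs ++ [b]).map (fun b => pvHexPair b ++ sep)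
      = (qs.map pvHexPair).map (fun q => q ++ sep) ++ [pvHexPair b ++ sep] := by
    simp
  rw [hmap]
  have hflat : ((qs.map pvHexPair).map (fun q => q ++ sep) ++ [pvHexPair b ++ sep]).flatten
      = ((qs.map pvHexPair).map (fun q => q ++ sep)).flatten ++ (pvHexPair b ++ sep) := by
    simp
  rw [hflat]
  unfold pvRstrip
  set X := ((qs.map pvHexPair).map (fun q => q ++ sep)).flatten with hX
  set l := pvLookup.getD (b &&& 15) '0' with hl
  set h0 := pvLookup.getD (b >>> 4) '0' with hh0
  have hrev : (X ++ (pvHexPair b ++ sep)).reverse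
      = sep.reverse ++ (l :: h0 :: X.reverse) := by
    simp [pvHexPair, List.reverse_append, hl, hh0]
  rw [hrev, pv_dropWhile_all _ sep.reverse _ (by intro x hx; simp at hx ⊢; exact hx)]
  rw [List.dropWhile_cons_of_neg (by simpa using hlast)]
  have hjoin : PySem.Chars.join sep ((qs ++ [b]).map pvHexPair)
      = ((qs.map pvHexPair).map (fun q => q ++ sep)).flatten ++ pvHexPair b := by
    rw [show (qs ++ [b]).map pvHexPair = qs.map pvHexPair ++ [pvHexPair b] by simp,
      pv_join_concat]
  rw [hjoin]
  simp [pvHexPair, hl, hh0, hX]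

-- ===== VERDICT (by name: the statement is the Claim_ definition above) =====
-- getLast! agrees with getLast on nonempty lists
theorem pv_getLast_bang (l : List Char) (h : l ≠ []) : l.getLast! = l.getLast h := by
  cases l with
  | nil => exact absurd rfl h
  | cons a as => simp [List.getLast!]

-- getLast! from getLast?
theorem pv_getLast_bang_some (l : List Char) (c : Char) (h : l.getLast? = some c) :
    l.getLast! = c := by
  cases l with
  | nil => simp at h
  | cons a as =>
    rw [List.getLast?_eq_some_getLast (show a::as ≠ [] by simp)] at h
    injection h with h

-- the low hex digit of the last byte is NOT in sep, from ¬ D_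
theorem pv_not_D_last (data separator : String) (hnD : ¬ D_bytes_to_base16 data separator)
    (h : data.toList ≠ []) :
    separator.toList.contains
      (pvLookup.getD (((data.toList.map (fun c => c.toNat)).getLast
        (by simpa using h)) &&& 15) '0') = false := by
  rw [List.getLast_map]
  by_contra hc
  exact hnD ⟨h, by rw [pv_getLast_bang data.toList h]; revert hc; cases hcon : separator.toList.contains (pvLookup.getD ((data.toList.getLast h).toNat &&& 15) '0') <;> simp⟩

theorem pv_toList_eq_of_ofList_eq (a b : List Char)
    (h : String.ofList a = String.ofList b) : a = b := by
  have := congrArg String.toList h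
  simpa using this

theorem bytes_to_base16_spec : Claim_unchanged_bytes_to_base16 := by
  intro data separator _ hnD
  show bytes_to_base16 data separator = bytes_to_base16_alt data separator
  unfold bytes_to_base16 bytes_to_base16_alt
  simp only []
  rw [pv_foldl_hex (data.toList.map (fun c => c.toNat)) separator.toList [], List.nil_append,
    pv_parts_eq (data.toList.map (fun c => c.toNat)) _ rfl]
  by_cases hd : data.toList = []
  · simp [hd, pvRstrip, PySem.Chars.join_nil]
  · have hbs : data.toList.map (fun c => c.toNat) ≠ [] := by simpa using hd
    rw [pv_rstrip_flatten separator.toList _ hbs (pv_not_D_last data separator hnD hd)]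

theorem bytes_to_base16_changed : Claim_changed_bytes_to_base16 := by
  unfold Claim_changed_bytes_to_base16; decide

theorem bytes_to_base16_tight : Claim_exact_bytes_to_base16 := by
  intro data separator _ hD hAB
  obtain ⟨hne, hmem⟩ := hD
  have hbs : data.toList.map (fun c => c.toNat) ≠ [] := by simpa using hne
  unfold bytes_to_base16 bytes_to_base16_alt at hAB
  simp only [] at hAB
  rw [pv_foldl_hex (data.toList.map (fun c => c.toNat)) separator.toList [], List.nil_append,
    pv_parts_eq (data.toList.map (fun c => c.toNat)) _ rfl] at hAB
  have hlist := pv_toList_eq_of_ofList_eq _ _ hAB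
  -- decompose bs = qs ++ [b]
  obtain ⟨qs, b, hqs⟩ := (data.toList.map (fun c => c.toNat)).eq_nil_or_concat.resolve_left hbs
  rw [hqs] at hlist
  simp only [List.concat_eq_append] at hlist
  -- the low hex digit of b is in sep
  have hl : separator.toList.contains (pvLookup.getD (b &&& 15) '0') = true := by
    have h1 : (data.toList.map (fun c => c.toNat)).getLast? = some b := by
      rw [hqs]; simp
    rw [List.getLast?_map] at h1
    cases hopt : data.toList.getLast? with
    | none => rw [hopt] at h1; simp at h1
    | some c =>
      rw [hopt] at h1
      simp at h1
      rw [pv_getLast_bang_some data.toList c hopt] at hmem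
      rw [← h1]
      exact hmem
  -- lengths differ
  set sep := separator.toList
  set X := ((qs.map pvHexPair).map (fun q => q ++ sep)).flatten with hX
  set l := pvLookup.getD (b &&& 15) '0' with hldef
  set h0 := pvLookup.getD (b >>> 4) '0' with hh0
  have hflatA : ((qs ++ [b]).map (fun b => pvHexPair b ++ sep)).flatten = X ++ (pvHexPair b ++ sep) := by
    simp [hX, Function.comp_def]
  have hjoinB : PySem.Chars.join sep ((qs ++ [b]).map pvHexPair) = X ++ pvHexPair b := by
    rw [show (qs ++ [b]).map pvHexPair = qs.map pvHexPair ++ [pvHexPair b] by simp, pv_join_concat]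
  rw [hflatA, hjoinB] at hlist
  have hrev : (X ++ (pvHexPair b ++ sep)).reverse = sep.reverse ++ (l :: h0 :: X.reverse) := by
    simp [pvHexPair, List.reverse_append, hldef, hh0]
  have hlenA : (pvRstrip (X ++ (pvHexPair b ++ sep)) sep).length ≤ X.length + 1 := by
    unfold pvRstrip
    rw [hrev, pv_dropWhile_all _ sep.reverse _ (by intro x hx; simp at hx; exact List.elem_eq_true_of_mem hx),
      List.dropWhile_cons_of_pos hl]
    have hle := List.length_dropWhile_le sep.contains (h0 :: X.reverse)
    have h2 : (h0 :: X.reverse).length = X.length + 1 := by simp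
    rw [List.length_reverse]
    omega
  have hlenB : (X ++ pvHexPair b).length = X.length + 2 := by simp [pvHexPair]
  have := congrArg List.length hlist
  rw [hlenB] at this
  omega
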